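-- pv_equiv track=rewrite | github.com/hahyuning/Coding-test-study | problem_solving/2021/210717/210717_7.py | solution
-- ===== SOURCE A (Python) =====
-- def solution(n):
--     if n == 0:
--         return 0
--     if n == 1:
--         return 1
--     if n % 2 == 1:
--         return 1 - solution(n // 2)
--     return solution(n // 2)
-- ===== SOURCE B (Python) =====
-- def solution(n):
--     res = 0
--     while n > 0:
--         res ^= n & 1
--         n >>= 1
--     return res
-- ===== Notes on version B (the rewrite author's own statement) =====
-- stated objective: alternative
-- what changed: Replaces A's top-down recursion with an iterative low-to-high bit loop keeping a running XOR accumulator.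
import Mathlib
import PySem

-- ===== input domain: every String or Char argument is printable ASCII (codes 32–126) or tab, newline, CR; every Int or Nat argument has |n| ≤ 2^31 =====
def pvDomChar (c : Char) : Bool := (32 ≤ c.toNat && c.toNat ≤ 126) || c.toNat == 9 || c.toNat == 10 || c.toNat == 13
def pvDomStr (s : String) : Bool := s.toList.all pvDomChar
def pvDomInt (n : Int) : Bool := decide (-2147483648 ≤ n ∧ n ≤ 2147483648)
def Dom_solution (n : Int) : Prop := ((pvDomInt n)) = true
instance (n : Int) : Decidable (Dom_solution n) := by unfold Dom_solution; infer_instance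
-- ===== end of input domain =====

-- B replaces A's recursive bit-parity with an iterative XOR-accumulator loop (alternative decomposition, same cost).


-- ===== PORT A =====
-- A's recursion on n over Int does not terminate for n < 0 (Python raises RecursionError there;
-- those inputs are excluded by Pre_solution), so the recursion is carried out on n.toNat,
-- which agrees with n on every admitted input.
def solutionGo : Nat → Int
  | 0 => 0
  | 1 => 1
  | (m+2) => if (m+2) % 2 = 1 then 1 - solutionGo ((m+2) / 2) else solutionGo ((m+2) / 2)

def solution (n : Int) : Int := solutionGo n.toNat

-- ===== PORT B =====
-- B's "while n > 0: res ^= n & 1; n >>= 1" as a tail recursion on n.toNat with accumulator res.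
def solutionAltGo (m : Nat) (res : Int) : Int :=
  if m = 0 then res else solutionAltGo (m / 2) (Int.xor res (m % 2 : Nat))

def solution_alt (n : Int) : Int := solutionAltGo n.toNat 0

-- ===== PRECONDITION & SPEC =====
-- A raises RecursionError for n < 0; Pre_ admits exactly the inputs where A returns.
def Pre_solution (n : Int) : Prop := 0 ≤ n
instance (n : Int) : Decidable (Pre_solution n) := by unfold Pre_solution; infer_instance
def pvWitness_solution : Int := (6)

def Spec_solution (n : Int) (out : Int) : Prop := out = solution_alt n
instance (n : Int) (out : Int) : Decidable (Spec_solution n out) := by unfold Spec_solution; infer_instance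

-- ===== CLAIM (what is proved, stated in full; the proofs are below) =====
def Claim_equal_solution : Prop := ∀ (n : Int), Dom_solution n → Pre_solution n → Spec_solution n (solution n)

-- ===== LEMMAS AND PROOFS =====
theorem solutionAltGo_eq (m : Nat) :
    solutionAltGo m 0 = solutionGo m ∧ solutionAltGo m 1 = 1 - solutionGo m := by
  induction m using Nat.strong_induction_on with
  | _ m ih =>
    match m with
    | 0 => constructor <;> simp [solutionAltGo, solutionGo]
    | 1 =>
      constructor <;>
        · rw [solutionAltGo, if_neg (by omega), solutionAltGo, if_pos rfl, solutionGo]; decide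
    | (k+2) =>
      have hq := ih ((k+2)/2) (by omega)
      have hne : (k+2) ≠ 0 := by omega
      rcases Nat.even_or_odd (k+2) with he | ho
      · have h2 : (k+2) % 2 = 0 := Nat.even_iff.mp he
        have hA : solutionGo (k+2) = solutionGo ((k+2)/2) := by
          rw [solutionGo]; rw [if_neg (by omega)]
        constructor
        · rw [solutionAltGo, if_neg hne, h2,
              show Int.xor 0 ((0:Nat):Int) = 0 from by decide, hq.1, hA]
        · rw [solutionAltGo, if_neg hne, h2,
              show Int.xor 1 ((0:Nat):Int) = 1 from by decide, hq.2, hA]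
      · have h2 : (k+2) % 2 = 1 := Nat.odd_iff.mp ho
        have hA : solutionGo (k+2) = 1 - solutionGo ((k+2)/2) := by
          rw [solutionGo]; rw [if_pos (by omega)]
        constructor
        · rw [solutionAltGo, if_neg hne, h2,
              show Int.xor 0 ((1:Nat):Int) = 1 from by decide, hq.2, hA]
        · rw [solutionAltGo, if_neg hne, h2,
              show Int.xor 1 ((1:Nat):Int) = 0 from by decide, hq.1, hA]
          ring

-- ===== VERDICT (by name: the statement is the Claim_ definition above) =====
theorem solution_spec : Claim_equal_solution := by
  intro n _ _
  show solutionGo n.toNat = solutionAltGo n.toNat 0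
  exact (solutionAltGo_eq n.toNat).1.symm
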